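-- pv_equiv track=rewrite | github.com/Giancarlo0811/ejercicios-python | 17-Buy_8_get_1_free/buy_8_get_1_free.py | getCostOfCoffee
-- ===== SOURCE A (Python) =====
-- def getCostOfCoffee(numberOfCoffees, pricePerCoffee):
--     totalPrice = 0
--     cupsUntilFreeCoffee = 8
--
--     while numberOfCoffees > 0:
--         numberOfCoffees -= 1
--         if cupsUntilFreeCoffee == 0:
--             cupsUntilFreeCoffee = 8
--         else:
--             totalPrice += pricePerCoffee
--             cupsUntilFreeCoffee -= 1
--     return totalPrice
-- ===== SOURCE B (Python) =====
-- def getCostOfCoffee(numberOfCoffees, pricePerCoffee):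
--     if numberOfCoffees <= 0:
--         return 0
--     return (numberOfCoffees - numberOfCoffees // 9) * pricePerCoffee
-- ===== Notes on version B (the rewrite author's own statement) =====
-- stated objective: faster
-- what changed: Replaced the one-cup-at-a-time while loop with the closed form (n - n//9)*price (every 9th coffee free).
import Mathlib
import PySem

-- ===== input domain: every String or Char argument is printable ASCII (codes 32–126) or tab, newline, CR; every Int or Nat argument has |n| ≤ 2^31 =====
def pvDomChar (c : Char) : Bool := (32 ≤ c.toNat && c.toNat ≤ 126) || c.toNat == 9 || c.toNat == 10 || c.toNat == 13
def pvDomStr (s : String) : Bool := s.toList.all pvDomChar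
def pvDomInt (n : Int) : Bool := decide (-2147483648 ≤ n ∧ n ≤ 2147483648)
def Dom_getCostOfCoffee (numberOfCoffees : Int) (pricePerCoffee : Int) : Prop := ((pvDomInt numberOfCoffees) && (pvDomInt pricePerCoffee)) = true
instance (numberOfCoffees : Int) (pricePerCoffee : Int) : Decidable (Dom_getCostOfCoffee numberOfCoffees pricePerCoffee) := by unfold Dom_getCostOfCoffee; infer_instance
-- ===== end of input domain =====

-- ===== PORT A =====
-- B replaces A's cup-by-cup while loop with the closed form (n - n//9)*price; faster (O(1) vs O(n)).
-- literal transliteration of A's while loop (state: numberOfCoffees, cupsUntilFreeCoffee, totalPrice)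
def getCostOfCoffeeLoop (numberOfCoffees : Int) (cupsUntilFreeCoffee : Int) (pricePerCoffee : Int) (totalPrice : Int) : Int :=
  if numberOfCoffees > 0 then
    if cupsUntilFreeCoffee == 0 then
      getCostOfCoffeeLoop (numberOfCoffees - 1) 8 pricePerCoffee totalPrice
    else
      getCostOfCoffeeLoop (numberOfCoffees - 1) (cupsUntilFreeCoffee - 1) pricePerCoffee (totalPrice + pricePerCoffee)
  else totalPrice
termination_by numberOfCoffees.toNat
decreasing_by all_goals omega

def getCostOfCoffee (numberOfCoffees : Int) (pricePerCoffee : Int) : Int :=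
  getCostOfCoffeeLoop numberOfCoffees 8 pricePerCoffee 0

-- ===== PORT B =====
def getCostOfCoffee_alt (numberOfCoffees : Int) (pricePerCoffee : Int) : Int :=
  if numberOfCoffees ≤ 0 then 0
  else (numberOfCoffees - PySem.Int.floordiv numberOfCoffees 9) * pricePerCoffee

-- ===== PRECONDITION & SPEC =====
def Spec_getCostOfCoffee (numberOfCoffees : Int) (pricePerCoffee : Int) (out : Int) : Prop := out = getCostOfCoffee_alt numberOfCoffees pricePerCoffee
instance (numberOfCoffees : Int) (pricePerCoffee : Int) (out : Int) : Decidable (Spec_getCostOfCoffee numberOfCoffees pricePerCoffee out) := by unfold Spec_getCostOfCoffee; infer_instance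

-- ===== CLAIM (what is proved, stated in full; the proofs are below) =====
def Claim_equal_getCostOfCoffee : Prop := ∀ (numberOfCoffees : Int) (pricePerCoffee : Int), Dom_getCostOfCoffee numberOfCoffees pricePerCoffee → Spec_getCostOfCoffee numberOfCoffees pricePerCoffee (getCostOfCoffee numberOfCoffees pricePerCoffee)

-- ===== LEMMAS AND PROOFS =====
-- loop invariant: starting with cups-until-free c ∈ [0,8], n ≥ 0 remaining coffees add (n - (n+8-c)/9)·price
theorem getCostOfCoffeeLoop_eq (m : Nat) (c price total : Int) (h0 : 0 ≤ c) (h8 : c ≤ 8) :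
    getCostOfCoffeeLoop (m : Int) c price total
      = total + ((m : Int) - ((m : Int) + 8 - c) / 9) * price := by
  induction m generalizing c total with
  | zero =>
    simp only [Nat.cast_zero]
    rw [getCostOfCoffeeLoop, if_neg (by omega : ¬ ((0:Int) > 0))]
    have h2 : ((0:Int) + 8 - c) / 9 = 0 := by omega
    rw [h2]
    ring
  | succ k ih =>
    rw [getCostOfCoffeeLoop]
    have hpos : ((k + 1 : Nat) : Int) > 0 := by push_cast; omega
    rw [if_pos hpos]
    by_cases hc : c = 0
    · have hb : (c == (0 : Int)) = true := by simp [hc]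
      rw [hb]
      simp only [if_true]
      have hcast : ((k + 1 : Nat) : Int) - 1 = (k : Int) := by push_cast; ring
      rw [hcast, ih 8 total (by omega) (by omega)]
      have hdiv : (((k + 1 : Nat) : Int) + 8 - c) / 9 = ((k : Int) + 8 - 8) / 9 + 1 := by
        push_cast; subst hc; omega
      rw [hdiv]; push_cast; ring
    · have hb : (c == (0 : Int)) = false := by simp [hc]
      rw [hb]
      simp only [Bool.false_eq_true, if_false]
      have hcast : ((k + 1 : Nat) : Int) - 1 = (k : Int) := by push_cast; ring
      rw [hcast, ih (c - 1) (total + price) (by omega) (by omega)]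
      have hdiv : (((k + 1 : Nat) : Int) + 8 - c) / 9 = ((k : Int) + 8 - (c - 1)) / 9 := by
        push_cast; omega
      rw [hdiv]; push_cast; ring

-- ===== VERDICT (by name: the statement is the Claim_ definition above) =====
theorem getCostOfCoffee_spec : Claim_equal_getCostOfCoffee := by
  intro n price _
  unfold Spec_getCostOfCoffee getCostOfCoffee getCostOfCoffee_alt
  by_cases h : n ≤ 0
  · rw [getCostOfCoffeeLoop, if_neg (by omega), if_pos h]
  · rw [if_neg h]
    have hn : ((n.toNat : Nat) : Int) = n := by omega
    have heq := getCostOfCoffeeLoop_eq n.toNat 8 price 0 (by omega) (by omega)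
    rw [hn] at heq
    rw [heq]
    have h9 : n + 8 - 8 = n := by ring
    have hfd : PySem.Int.floordiv n 9 = n / 9 := by
      simp [PySem.Int.floordiv, Int.fdiv_eq_ediv]
    rw [h9, hfd]
    ring
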